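-- pv_equiv track=rewrite | github.com/Yuan-Hou/Video-Eval | subjects/video_quality.py | _merge_cli_args
-- ===== SOURCE A (Python) =====
-- from typing import Any, Dict, Iterable, List, Sequence, Tuple
--
-- def _merge_cli_args(base: Sequence[str], overrides: Sequence[str]) -> List[str]:
--     """Merge ``overrides`` into ``base`` while allowing replacements.
--
--     The function inspects keys (``--flag`` tokens) from ``overrides`` and
--     removes the matching entries from ``base`` before appending the new
--     arguments.  Both ``--flag value`` and ``--flag=value`` forms are supported.
--     """
--
--     keys: set[str] = set()
--     normalised_overrides: List[str] = []
--
--     idx = 0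
--     while idx < len(overrides):
--         token = overrides[idx]
--         key = token.split("=", 1)[0] if token.startswith("--") else ""
--         if key and key.startswith("--"):
--             keys.add(key)
--         normalised_overrides.append(token)
--         idx += 1
--
--         if key and "=" not in token and idx < len(overrides):
--             next_token = overrides[idx]
--             if not next_token.startswith("--"):
--                 normalised_overrides.append(next_token)
--                 idx += 1
--
--     result: List[str] = []
--     idx = 0
--     while idx < len(base):
--         token = base[idx]
--         if token.startswith("--"):
--             key = token.split("=", 1)[0]
--             if key in keys:
--                 idx += 1
--                 if "=" not in token and idx < len(base) and not base[idx].startswith("--"):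
--                     idx += 1
--                 continue
--         result.append(token)
--         idx += 1
--
--     result.extend(normalised_overrides)
--     return result
-- ===== SOURCE B (Python) =====
-- from typing import List, Sequence
--
--
-- def _merge_cli_args(base: Sequence[str], overrides: Sequence[str]) -> List[str]:
--     """Merge overrides into base: group base into (flag, value) argument
--     groups, drop the groups whose flag key is overridden, append overrides."""
--     keys = {t.split("=", 1)[0] for t in overrides if t.startswith("--")}
--
--     groups: List[List[str]] = []
--     i, n = 0, len(base)
--     while i < n:
--         t = base[i]
--         if (t.startswith("--") and "=" not in t
--                 and i + 1 < n and not base[i + 1].startswith("--")):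
--             groups.append([t, base[i + 1]])
--             i += 2
--         else:
--             groups.append([t])
--             i += 1
--
--     kept = [tok
--             for g in groups
--             if not (g[0].startswith("--") and g[0].split("=", 1)[0] in keys)
--             for tok in g]
--     return kept + list(overrides)
-- ===== Notes on version B (the rewrite author's own statement) =====
-- stated objective: simpler
-- what changed: Replaces A's two index-juggling while loops (key collection with value-token skipping, and a rebuild loop with manual idx skips) by a declarative pipeline: a set comprehension for the override keys, grouping base into flag/value argument groups, filtering out overridden groups, flattening, and appending overrides verbatim.
import Mathlib
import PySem

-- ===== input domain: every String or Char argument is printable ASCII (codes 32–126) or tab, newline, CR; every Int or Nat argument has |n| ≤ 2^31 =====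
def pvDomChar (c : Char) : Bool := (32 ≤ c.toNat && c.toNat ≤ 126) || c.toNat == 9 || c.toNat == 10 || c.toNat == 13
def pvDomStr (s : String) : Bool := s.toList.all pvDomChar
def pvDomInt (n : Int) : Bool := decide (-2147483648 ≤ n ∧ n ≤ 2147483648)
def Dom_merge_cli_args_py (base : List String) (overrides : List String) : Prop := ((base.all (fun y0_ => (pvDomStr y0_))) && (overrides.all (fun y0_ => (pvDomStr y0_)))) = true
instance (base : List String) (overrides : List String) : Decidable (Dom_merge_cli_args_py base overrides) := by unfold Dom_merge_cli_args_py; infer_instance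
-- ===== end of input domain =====

-- B replaces A's two index-juggling while loops by a declarative pipeline: materialise base's
-- flag/value groups, filter out overridden groups, flatten, append overrides (objective: simpler).

-- token.split("=", 1)[0]  (shared pure string utility of both ports)
def pvKey (t : String) : String := ((PySem.Str.splitMax? t "=" 1).getD []).headD t

-- ===== PORT A =====
-- first while loop of A: collect keys and normalised_overrides (with value-token skipping)
-- key = token.split("=", 1)[0] if token.startswith("--") else ""
def aKeyOf (token : String) : String :=
  if PySem.Str.startswith token "--" then pvKey token else ""

-- if key and key.startswith("--"): keys.add(key)
def aAddKey (keys : PySem.Set String) (key : String) : PySem.Set String :=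
  if key ≠ "" && PySem.Str.startswith key "--" then PySem.Set.add keys key else keys

def aNorm (l : List String) (keys : PySem.Set String) (acc : List String) :
    PySem.Set String × List String :=
  match l with
  | [] => (keys, acc)
  | token :: rest =>
    match rest with
    | [] => (aAddKey keys (aKeyOf token), acc ++ [token])
    | next :: rest' =>
      if aKeyOf token ≠ "" && !(PySem.Str.isIn "=" token) && !(PySem.Str.startswith next "--") then
        aNorm rest' (aAddKey keys (aKeyOf token)) ((acc ++ [token]) ++ [next])
      else
        aNorm (next :: rest') (aAddKey keys (aKeyOf token)) (acc ++ [token])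
termination_by l.length
decreasing_by all_goals simp

-- second while loop of A: rebuild base skipping overridden flags (and their value token)
def aRes (keys : PySem.Set String) (l : List String) : List String :=
  match l with
  | [] => []
  | token :: rest =>
    if PySem.Str.startswith token "--" then
      if PySem.Set.contains keys (pvKey token) then
        if !(PySem.Str.isIn "=" token) then
          match rest with
          | [] => []
          | next :: rest' =>
            if !(PySem.Str.startswith next "--") then aRes keys rest' else aRes keys (next :: rest')
        else aRes keys rest
      else token :: aRes keys rest
    else token :: aRes keys rest
termination_by l.length
decreasing_by all_goals simp

def merge_cli_args_py (base : List String) (overrides : List String) : List String :=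
  let p := aNorm overrides PySem.Set.empty []
  aRes p.1 base ++ p.2

-- ===== PORT B =====
-- group base: a '--flag' without '=' captures a following non-'--' token as its value
def bGroups : List String → List (List String)
  | [] => []
  | [t] => [[t]]
  | t :: next :: rest =>
    if PySem.Str.startswith t "--" && !(PySem.Str.isIn "=" t) && !(PySem.Str.startswith next "--") then
      [t, next] :: bGroups rest
    else
      [t] :: bGroups (next :: rest)

def bDrop (keys : PySem.Set String) : List String → Bool
  | [] => false
  | t :: _ => PySem.Str.startswith t "--" && PySem.Set.contains keys (pvKey t)

def merge_cli_args_py_alt (base : List String) (overrides : List String) : List String :=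
  let keys : PySem.Set String :=
    PySem.Set.ofList ((overrides.filter (fun t => PySem.Str.startswith t "--")).map pvKey)
  ((bGroups base).filter (fun g => !(bDrop keys g))).flatten ++ overrides

-- ===== PRECONDITION & SPEC =====
def Spec_merge_cli_args_py (base : List String) (overrides : List String) (out : List String) : Prop := out = merge_cli_args_py_alt base overrides
instance (base : List String) (overrides : List String) (out : List String) : Decidable (Spec_merge_cli_args_py base overrides out) := by unfold Spec_merge_cli_args_py; infer_instance

-- ===== CLAIM (what is proved, stated in full; the proofs are below) =====
def Claim_equal_merge_cli_args_py : Prop := ∀ (base : List String) (overrides : List String), Dom_merge_cli_args_py base overrides → Spec_merge_cli_args_py base overrides (merge_cli_args_py base overrides)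

-- ===== LEMMAS AND PROOFS =====

-- facts about PySem.Chars.splitOnMax.go needed for pvKey: accumulator shape and head shape
theorem go_acc (sep : List Char) (fuel : Nat) : ∀ (m : Nat) (l cur : List Char) (acc : List (List Char)),
    PySem.Chars.splitOnMax.go sep fuel m l cur acc
      = acc.reverse ++ PySem.Chars.splitOnMax.go sep fuel m l cur [] := by
  induction fuel with
  | zero => intro m l cur acc; simp [PySem.Chars.splitOnMax.go]
  | succ fuel ih =>
    intro m l cur acc
    cases l with
    | nil => simp [PySem.Chars.splitOnMax.go]
    | cons c rest =>
      simp only [PySem.Chars.splitOnMax.go]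
      by_cases hm : m = 0
      · simp [hm]
      · simp only [hm, if_false]
        by_cases hp : sep.isPrefixOf (c :: rest) = true
        · simp only [hp, if_true]
          rw [ih, ih (acc := [cur.reverse])]
          simp
        · have h1 := ih m rest (c :: cur) acc
          have h2 := ih m rest (c :: cur) []
          simp [hp, h1]

theorem go_head (sep : List Char) (fuel : Nat) : ∀ (m : Nat) (l cur : List Char),
    ∃ u tl, PySem.Chars.splitOnMax.go sep fuel m l cur [] = (cur.reverse ++ u) :: tl := by
  induction fuel with
  | zero => intro m l cur; exact ⟨l, [], by simp [PySem.Chars.splitOnMax.go]⟩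
  | succ fuel ih =>
    intro m l cur
    cases l with
    | nil => exact ⟨[], [], by simp [PySem.Chars.splitOnMax.go]⟩
    | cons c rest =>
      by_cases hm : m = 0
      · exact ⟨c :: rest, [], by simp [PySem.Chars.splitOnMax.go, hm]⟩
      · by_cases hp : sep.isPrefixOf (c :: rest) = true
        · refine ⟨[], ?_, ?_⟩
          · exact PySem.Chars.splitOnMax.go sep fuel (m - 1) (List.drop sep.length (c :: rest)) [] []
          · simp only [PySem.Chars.splitOnMax.go, hm, hp]
            rw [go_acc]
            simp
        · obtain ⟨u, tl, h⟩ := ih m rest (c :: cur)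
          refine ⟨c :: u, tl, ?_⟩
          simp only [PySem.Chars.splitOnMax.go, hm, hp]
          rw [h]; simp


theorem go_step (fuel : Nat) (c : Char) (rest cur : List Char) (m : Nat)
    (hm : m ≠ 0) (hc : c ≠ '=') :
    PySem.Chars.splitOnMax.go ['='] (fuel + 1) m (c :: rest) cur []
      = PySem.Chars.splitOnMax.go ['='] fuel m rest (c :: cur) [] := by
  simp [PySem.Chars.splitOnMax.go, hm, List.isPrefixOf, Ne.symm hc]

theorem pvKey_toList (t : String) (h : PySem.Str.startswith t "--" = true) :
    ∃ u, (pvKey t).toList = '-' :: '-' :: u := by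
  have hpre : ['-', '-'].isPrefixOf t.toList = true := by
    simpa [PySem.Str.startswith, PySem.Chars.startswith] using h
  obtain ⟨cs, hcs⟩ : ∃ cs, t.toList = '-' :: '-' :: cs := by
    cases ht : t.toList with
    | nil => rw [ht] at hpre; simp [List.isPrefixOf] at hpre
    | cons a l =>
      cases l with
      | nil => rw [ht] at hpre; simp [List.isPrefixOf] at hpre
      | cons b l' =>
        rw [ht] at hpre
        simp [List.isPrefixOf] at hpre
        exact ⟨l', by simp [← hpre.1, ← hpre.2]⟩
  obtain ⟨u, tl, hgo⟩ := go_head ['='] (cs.length + 1) 1 cs ['-', '-']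
  have hsplit : PySem.Chars.splitOnMax t.toList ['='] 1 = ('-' :: '-' :: u) :: tl := by
    rw [PySem.Chars.splitOnMax]
    simp only [hcs, List.length_cons]
    rw [show (1 : Int).toNat = 1 from rfl]
    rw [show cs.length + 1 + 1 + 1 = (cs.length + 1 + 1) + 1 from rfl]
    rw [go_step _ _ _ _ _ (by simp) (by decide)]
    rw [go_step _ _ _ _ _ (by simp) (by decide)]
    simpa using hgo
  refine ⟨u, ?_⟩
  unfold pvKey
  rw [PySem.Str.splitMax?]
  rw [show ("=" : String).toList = ['='] from rfl]
  rw [PySem.Chars.splitMax?]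
  simp [hsplit]

theorem pvKey_startswith (t : String) (h : PySem.Str.startswith t "--" = true) :
    PySem.Str.startswith (pvKey t) "--" = true := by
  obtain ⟨u, hu⟩ := pvKey_toList t h
  simp [PySem.Str.startswith, PySem.Chars.startswith, hu, List.isPrefixOf]

theorem pvKey_ne_empty (t : String) (h : PySem.Str.startswith t "--" = true) :
    pvKey t ≠ "" := by
  obtain ⟨u, hu⟩ := pvKey_toList t h
  intro he
  rw [he] at hu
  simp at hu

-- collecting a key from token does nothing unless token starts with '--'
theorem aAddKey_eq (keys : PySem.Set String) (token : String) :
    aAddKey keys (aKeyOf token)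
      = if PySem.Str.startswith token "--" then PySem.Set.add keys (pvKey token) else keys := by
  by_cases hs : PySem.Str.startswith token "--" = true
  · have h1 := pvKey_ne_empty token hs
    have h2 : PySem.Chars.startswith (pvKey token).toList ['-', '-'] = true := by
      simpa using pvKey_startswith token hs
    rw [if_pos hs, aKeyOf, if_pos hs, aAddKey, if_pos (by simp [h1, h2])]
  · rw [if_neg hs, aKeyOf, if_neg hs, aAddKey]
    simp

-- A's normalised_overrides list is just the overrides, verbatim
theorem aNorm_snd (l : List String) (keys : PySem.Set String) (acc : List String) :
    (aNorm l keys acc).2 = acc ++ l := by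
  fun_induction aNorm l keys acc with
  | case1 keys acc => simp
  | case2 keys acc token => simp
  | case3 keys acc token next rest' h ih => simp_all
  | case4 keys acc token next rest' h ih => simp_all

-- A's key set is the fold of B's comprehension list
theorem aNorm_fst (l : List String) (keys : PySem.Set String) (acc : List String) :
    (aNorm l keys acc).1 =
      ((l.filter (fun t => PySem.Str.startswith t "--")).map pvKey).foldl PySem.Set.add keys := by
  fun_induction aNorm l keys acc with
  | case1 keys acc => simp
  | case2 keys acc token =>
    by_cases hs : PySem.Chars.startswith token.toList ['-', '-'] = true
    · simp [hs, aAddKey_eq]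
    · simp [Bool.not_eq_true] at hs
      simp [hs, aAddKey_eq]
  | case3 keys acc token next rest' h ih =>
    have hs : PySem.Chars.startswith token.toList ['-', '-'] = true := by
      by_contra hs
      simp [Bool.not_eq_true] at hs
      simp [aKeyOf, PySem.Str.startswith, hs] at h
    have hn : PySem.Chars.startswith next.toList ['-', '-'] = false := by
      simp at h
      exact h.2
    simp [aAddKey_eq, hs] at ih
    simpa [hs, hn, aAddKey_eq] using ih
  | case4 keys acc token next rest' h ih =>
    by_cases hs : PySem.Chars.startswith token.toList ['-', '-'] = true
    · simp [aAddKey_eq, hs] at ih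
      simpa [hs, aAddKey_eq] using ih
    · simp [Bool.not_eq_true] at hs
      simp [aAddKey_eq, hs] at ih
      simpa [hs, aAddKey_eq] using ih

-- a token that is no '--flag' (or carries '=' / is followed by a '--token') forms a singleton group
theorem bGroups_cons_not_pair (t : String) (r : List String)
    (h : PySem.Chars.startswith t.toList ['-', '-'] = false ∨ PySem.Chars.isIn ['='] t.toList = true
         ∨ (∃ m r', r = m :: r' ∧ PySem.Chars.startswith m.toList ['-', '-'] = true)) :
    bGroups (t :: r) = [t] :: bGroups r := by
  cases r with
  | nil => simp [bGroups]
  | cons m r' =>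
    rcases h with h | h | ⟨m', r'', hr, hm⟩
    · simp [bGroups, h]
    · simp [bGroups, h]
    · cases hr
      simp [bGroups, hm]

-- A's base-rebuilding loop = B's group-filter-flatten pipeline
theorem aRes_eq (keys : PySem.Set String) (base : List String) :
    aRes keys base = ((bGroups base).filter (fun g => !(bDrop keys g))).flatten := by
  fun_induction aRes keys base with
  | case1 => simp [bGroups]
  | case2 token h1 h2 h3 =>
    simp_all [bGroups, bDrop]
  | case3 token next rest' h1 h2 h3 h4 ih =>
    simp_all [bGroups, bDrop]
  | case4 token next rest' h1 h2 h3 h4 ih =>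
    simp_all [bGroups, bDrop]
  | case5 token rest h1 h2 h3 ih =>
    cases rest with
    | nil => simp_all [bGroups, bDrop]
    | cons next rest'' => simp_all [bGroups, bDrop]
  | case6 token rest h1 h2 ih =>
    cases rest with
    | nil => simp_all [bGroups, bDrop]
    | cons next rest'' =>
      by_cases hn : PySem.Chars.startswith next.toList ['-', '-'] = true
      · rw [bGroups_cons_not_pair token _ (Or.inr (Or.inr ⟨next, rest'', rfl, hn⟩))]
        simp_all [bDrop]
      · simp [Bool.not_eq_true] at hn
        by_cases hi : PySem.Chars.isIn ['='] token.toList = true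
        · rw [bGroups_cons_not_pair token _ (Or.inr (Or.inl hi))]
          simp_all [bDrop]
        · simp [Bool.not_eq_true] at hi
          rw [ih, bGroups_cons_not_pair next _ (Or.inl hn)]
          simp_all [bGroups, bDrop]
  | case7 token rest h1 ih =>
    cases rest with
    | nil => simp_all [bGroups, bDrop]
    | cons next rest'' =>
      have h1' : PySem.Chars.startswith token.toList ['-', '-'] = false := by
        simpa [Bool.not_eq_true] using h1
      rw [bGroups_cons_not_pair token _ (Or.inl h1')]
      simp_all [bDrop]

-- ===== VERDICT (by name: the statement is the Claim_ definition above) =====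
theorem merge_cli_args_py_spec : Claim_equal_merge_cli_args_py := by
  intro base overrides _
  show _ = _
  unfold merge_cli_args_py merge_cli_args_py_alt
  simp only [aNorm_snd, aNorm_fst, aRes_eq, PySem.Set.ofList_eq_foldl, List.nil_append]
  rfl
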